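-- pv_equiv track=rewrite | github.com/NarutoDing/naruto_apollo_v7 | tools/ApolloBuildEnv/create_apollo_cmakelist.py | GetLibraryNameSpace
-- ===== SOURCE A (Python) =====
-- def GetLibraryNameSpace(path, modules_name):
--   str_lit = []
--   str_lit = path.split('/')
--   rest_str_list = str_lit.copy()
--   library_name_space = ""
--   for (i,v) in enumerate(str_lit):
--     if v == modules_name:
--       break
--     rest_str_list.remove(v)
--   rest_str_list_size = len(rest_str_list)
--   for (j,k) in enumerate(rest_str_list):
--     library_name_space += k
--     if j == rest_str_list_size - 1:
--       break
--     library_name_space += '::'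
--   library_name_space += '::'
--   return library_name_space
-- ===== SOURCE B (Python) =====
-- def GetLibraryNameSpace(path, modules_name):
--     segments = path.split('/')
--     if modules_name in segments:
--         i = segments.index(modules_name)
--         return '::'.join(segments[i:]) + '::'
--     return '::'
-- ===== Notes on version B (the rewrite author's own statement) =====
-- stated objective: simpler
-- what changed: Replaces A's copy-then-repeatedly-remove loop and manual counter-based join loop with a membership test, index lookup, slice and '::'.join.
import Mathlib
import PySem

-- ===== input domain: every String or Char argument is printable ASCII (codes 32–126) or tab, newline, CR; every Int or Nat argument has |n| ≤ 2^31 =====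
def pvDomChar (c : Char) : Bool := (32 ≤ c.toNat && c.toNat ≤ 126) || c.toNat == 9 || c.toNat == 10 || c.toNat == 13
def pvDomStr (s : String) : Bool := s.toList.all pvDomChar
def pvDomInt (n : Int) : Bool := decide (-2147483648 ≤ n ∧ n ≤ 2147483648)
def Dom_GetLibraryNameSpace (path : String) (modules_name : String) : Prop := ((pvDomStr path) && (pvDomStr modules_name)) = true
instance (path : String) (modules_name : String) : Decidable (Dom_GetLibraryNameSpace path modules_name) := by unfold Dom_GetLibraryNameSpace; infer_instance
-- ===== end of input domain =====

-- B replaces A's copy-and-repeatedly-remove loop plus manual counting join loop by a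
-- membership test + index + slice + join (objective: simpler).


-- ===== PORT A =====
-- first loop of A: for (i,v) in enumerate(str_lit): if v == modules_name: break; rest.remove(v)
-- (rest.remove(v) never raises here — v is always present in rest —, so .getD rest is never taken)
def pvALoop (mn : String) : List String → List String → List String
  | [], rest => rest
  | v :: vs, rest =>
      if v == mn then rest
      else pvALoop mn vs ((PySem.List.remove? rest v).getD rest)

-- second loop of A: for (j,k) in enumerate(rest): acc += k; if j == size - 1: break; acc += '::'
def pvAJoin (size : Nat) : List String → Nat → String → String
  | [], _, acc => acc
  | k :: ks, j, acc =>
      if j == size - 1 then acc ++ k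
      else pvAJoin size ks (j + 1) (acc ++ k ++ "::")

def GetLibraryNameSpace (path : String) (modules_name : String) : String :=
  let str_lit := (PySem.Str.split? path "/").getD []   -- sep "/" ≠ "", so split? is never none
  let rest := pvALoop modules_name str_lit str_lit
  pvAJoin rest.length rest 0 "" ++ "::"

-- ===== PORT B =====
def GetLibraryNameSpace_alt (path : String) (modules_name : String) : String :=
  let segments := (PySem.Str.split? path "/").getD []   -- sep "/" ≠ "", so split? is never none
  match PySem.List.index? segments modules_name with    -- 'if modules_name in segments: i = segments.index(...)'
  | some i => PySem.Str.join "::" (PySem.List.slice segments (some (i : Int)) none) ++ "::"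
  | none => "::"

-- ===== PRECONDITION & SPEC =====
def Spec_GetLibraryNameSpace (path : String) (modules_name : String) (out : String) : Prop := out = GetLibraryNameSpace_alt path modules_name
instance (path : String) (modules_name : String) (out : String) : Decidable (Spec_GetLibraryNameSpace path modules_name out) := by unfold Spec_GetLibraryNameSpace; infer_instance

-- ===== CLAIM (what is proved, stated in full; the proofs are below) =====
def Claim_equal_GetLibraryNameSpace : Prop := ∀ (path : String) (modules_name : String), Dom_GetLibraryNameSpace path modules_name → Spec_GetLibraryNameSpace path modules_name (GetLibraryNameSpace path modules_name)

-- ===== LEMMAS AND PROOFS =====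

-- A's manual join loop computes '::'.join
theorem pvAJoin_eq (ks : List String) : ∀ (k : String) (j : Nat) (acc : String),
    pvAJoin (j + ks.length + 1) (k :: ks) j acc = acc ++ PySem.Str.join "::" (k :: ks) := by
  induction ks with
  | nil =>
      intro k j acc
      rw [pvAJoin]
      have hif : (j == j + ([] : List String).length + 1 - 1) = true := by simp
      rw [hif]
      simp only [if_true]
      rw [← String.toList_inj]
      simp [PySem.Str.toList_join, PySem.Chars.join_singleton]
  | cons k2 ks ih =>
      intro k j acc
      rw [pvAJoin]
      have hif : (j == j + (k2 :: ks).length + 1 - 1) = false := by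
        simp
      rw [hif]
      simp only [Bool.false_eq_true, if_false]
      have hsz : j + (k2 :: ks).length + 1 = (j + 1) + ks.length + 1 := by
        simp [List.length_cons]; omega
      rw [hsz, ih k2 (j + 1) (acc ++ k ++ "::")]
      rw [← String.toList_inj]
      simp [PySem.Str.toList_join, PySem.Chars.join_cons_cons]

-- the core equivalence, over the already-split segment list
theorem pvCore_eq (mn : String) (l : List String) :
    pvAJoin (pvALoop mn l l).length (pvALoop mn l l) 0 "" ++ "::" =
      (match PySem.List.index? l mn with
       | some i => PySem.Str.join "::" (PySem.List.slice l (some (i : Int)) none) ++ "::"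
       | none => "::") := by
  induction l with
  | nil =>
      simp [pvALoop, pvAJoin, PySem.List.index?]
  | cons v vs ih =>
      by_cases hv : v = mn
      · subst hv
        simp only [pvALoop, beq_self_eq_true, if_true, PySem.List.index?_cons_self]
        rw [PySem.List.slice_from_natCast]
        have h := pvAJoin_eq vs v 0 ""
        rw [show (v :: vs).length = 0 + vs.length + 1 by simp]
        rw [h]
        rw [← String.toList_inj]; simp
      · have hloop : pvALoop mn (v :: vs) (v :: vs) = pvALoop mn vs vs := by
          simp only [pvALoop, beq_iff_eq, if_neg hv, PySem.List.remove?_cons_self,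
            Option.getD_some]
        rw [hloop, ih, PySem.List.index?_cons_of_ne _ hv]
        cases hidx : PySem.List.index? vs mn with
        | none => simp
        | some i =>
            simp only [Option.map_some]
            rw [PySem.List.slice_from_natCast, PySem.List.slice_from_natCast]
            simp [List.drop_succ_cons]

-- ===== VERDICT (by name: the statement is the Claim_ definition above) =====
theorem GetLibraryNameSpace_spec : Claim_equal_GetLibraryNameSpace := by
  intro path modules_name _
  unfold Spec_GetLibraryNameSpace GetLibraryNameSpace GetLibraryNameSpace_alt
  exact pvCore_eq modules_name ((PySem.Str.split? path "/").getD [])
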